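-- pv_equiv track=rewrite | github.com/skanwngud/Algorithm | PythonAlgorithmInterview/2_6_3_logfile.py | soultion
-- ===== SOURCE A (Python) =====
-- def soultion(string):
--     result_list = []  # 결과 리스트
--
--     letter_list = []  # 문자 리스트
--     digi_list = []  # 숫자 리스트
--
--     for idx in range(len(string)):  # 입력값을 순회
--         string_id = string[idx].split(" ")[0]  # 빈칸을 기준으로 split 한 값 (식별자)
--
--         if string_id[:3] == "let":  # 식별자가 let (문자) 이면
--             letter_list.append(string[idx])  # letter_list 에 append
--         else:                       # 식별자가 dig (숫자) 이면
--             digi_list.append(string[idx])  # digit_letter 에 append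
--
--     result_list = letter_list + digi_list  # 두 리스트를 + 연산
--
--     return result_list
-- ===== SOURCE B (Python) =====
-- def soultion(string):
--     return sorted(string, key=lambda s: s.split(" ")[0][:3] != "let")
-- ===== Notes on version B (the rewrite author's own statement) =====
-- stated objective: idiomatic
-- what changed: Replaces the explicit two-accumulator partition loop with a single stable sort on the boolean key 'identifier prefix != "let"', whose stability reproduces the letter-then-digit order.
import Mathlib
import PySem

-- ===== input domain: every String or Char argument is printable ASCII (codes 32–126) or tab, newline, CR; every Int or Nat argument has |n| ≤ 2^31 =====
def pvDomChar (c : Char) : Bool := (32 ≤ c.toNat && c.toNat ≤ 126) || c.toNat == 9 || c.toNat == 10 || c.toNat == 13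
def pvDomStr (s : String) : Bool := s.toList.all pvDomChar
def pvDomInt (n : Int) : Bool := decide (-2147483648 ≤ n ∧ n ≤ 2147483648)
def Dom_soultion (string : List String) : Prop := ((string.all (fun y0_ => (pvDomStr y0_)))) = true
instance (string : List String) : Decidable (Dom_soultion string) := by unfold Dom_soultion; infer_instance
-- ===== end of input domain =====

-- B replaces A's two-accumulator partition loop by one stable sort on the boolean key
-- "identifier prefix != 'let'" (idiomatic, not faster); equivalence of return values proved below.


-- ===== PORT A =====
-- s.split(" ")[0][:3] == "let": split(" ") with a nonempty separator always yields a nonempty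
-- list, so the [0] lookup never raises; getD [""] / headD "" are exact here.
def pvIsLet (s : String) : Bool :=
  PySem.Str.slice (((PySem.Str.split? s " ").getD [""]).headD "") none (some 3) == "let"

-- the for-loop over range(len(string)) reading string[idx] is the left fold over the list;
-- letter_list / digi_list are the two accumulator components.
def soultion (string : List String) : List String :=
  let acc := string.foldl
    (fun (acc : List String × List String) x =>
      if pvIsLet x then (acc.1 ++ [x], acc.2) else (acc.1, acc.2 ++ [x]))
    ([], [])
  acc.1 ++ acc.2

-- ===== PORT B =====
-- sorted(string, key=lambda s: s.split(" ")[0][:3] != "let"): Python's bool key False < True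
-- is ported as the Nat key 0 (letter log) / 1 (digit log).
def soultion_alt (string : List String) : List String :=
  PySem.List.sorted string (fun s => if pvIsLet s then (0 : Nat) else 1) false

-- ===== PRECONDITION & SPEC =====
def Spec_soultion (string : List String) (out : List String) : Prop := out = soultion_alt string
instance (string : List String) (out : List String) : Decidable (Spec_soultion string out) := by unfold Spec_soultion; infer_instance

-- ===== CLAIM (what is proved, stated in full; the proofs are below) =====
def Claim_equal_soultion : Prop := ∀ (string : List String), Dom_soultion string → Spec_soultion string (soultion string)

-- ===== LEMMAS AND PROOFS =====

-- The 0/1 key used by B's sort.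
def pvKey (s : String) : Nat := if pvIsLet s then 0 else 1

def pvBef (a b : String) : Bool := decide (pvKey a < pvKey b)

-- Inserting x into A ++ B where x goes after everything in A and before everything in B.
theorem insertBy_split (x : String) (A B : List String)
    (hA : ∀ a ∈ A, pvBef x a = false) (hB : ∀ b ∈ B, pvBef x b = true) :
    PySem.List.insertBy pvBef x (A ++ B) = A ++ x :: B := by
  induction A with
  | nil =>
    cases B with
    | nil => rfl
    | cons b bs =>
      simp [PySem.List.insertBy, hB b (by simp)]
  | cons a as ih =>
    have hxa := hA a (by simp)
    simp [PySem.List.insertBy, hxa]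
    exact ih (fun a' ha' => hA a' (by simp [ha']))

-- Invariant of B's insertion fold: starting from a letter-block A followed by a digit-block B,
-- the fold produces (A ++ letters of xs) ++ (B ++ digits of xs).
theorem foldl_insertBy_partition (xs A B : List String)
    (hA : ∀ a ∈ A, pvIsLet a = true) (hB : ∀ b ∈ B, pvIsLet b = false) :
    xs.foldl (fun acc x => PySem.List.insertBy pvBef x acc) (A ++ B)
      = (A ++ xs.filter pvIsLet) ++ (B ++ xs.filter (fun x => !pvIsLet x)) := by
  induction xs generalizing A B with
  | nil => simp
  | cons x xs ih =>
    by_cases hx : pvIsLet x = true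
    · have hstep : PySem.List.insertBy pvBef x (A ++ B) = (A ++ [x]) ++ B := by
        rw [insertBy_split x A B
          (fun a ha => by simp [pvBef, pvKey, hx, hA a ha])
          (fun b hb => by simp [pvBef, pvKey, hx, hB b hb])]
        simp
      have hA' : ∀ a ∈ A ++ [x], pvIsLet a = true := by
        intro a ha
        rcases List.mem_append.1 ha with h | h
        · exact hA a h
        · rw [List.mem_singleton] at h
          exact h ▸ hx
      simp only [List.foldl_cons, hstep]
      rw [ih (A ++ [x]) B hA' hB]
      simp [hx]
    · have hx' : pvIsLet x = false := by simpa using hx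
      have hnb : ∀ y ∈ A ++ B, pvBef x y = false := by
        intro y hy
        simp [pvBef, pvKey, hx']
        split <;> simp
      have hstep : PySem.List.insertBy pvBef x (A ++ B) = A ++ (B ++ [x]) := by
        rw [← List.append_assoc, PySem.List.insertBy_of_forall_not_before pvBef x (A ++ B) hnb]
      have hB' : ∀ b ∈ B ++ [x], pvIsLet b = false := by
        intro b hb
        rcases List.mem_append.1 hb with h | h
        · exact hB b h
        · rw [List.mem_singleton] at h
          exact h ▸ hx'
      simp only [List.foldl_cons, hstep]
      rw [ih A (B ++ [x]) hA hB']
      simp [hx']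

-- B's sort is exactly the letter/digit partition.
theorem soultion_alt_eq (string : List String) :
    soultion_alt string = string.filter pvIsLet ++ string.filter (fun x => !pvIsLet x) := by
  unfold soultion_alt
  rw [PySem.List.sorted_eq_foldl_insertBy]
  have := foldl_insertBy_partition string [] [] (by simp) (by simp)
  simpa [pvBef, pvKey] using this

-- A's accumulator pair is the pair of filters.
theorem foldA_eq (xs : List String) (A B : List String) :
    xs.foldl (fun (acc : List String × List String) x =>
        if pvIsLet x then (acc.1 ++ [x], acc.2) else (acc.1, acc.2 ++ [x])) (A, B)
      = (A ++ xs.filter pvIsLet, B ++ xs.filter (fun x => !pvIsLet x)) := by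
  induction xs generalizing A B with
  | nil => simp
  | cons x xs ih =>
    by_cases hx : pvIsLet x = true
    · simp [hx, ih]
    · have hx' : pvIsLet x = false := by simpa using hx
      simp [hx', ih]

-- ===== VERDICT (by name: the statement is the Claim_ definition above) =====
theorem soultion_spec : Claim_equal_soultion := by
  intro string _
  unfold Spec_soultion soultion
  rw [soultion_alt_eq]
  simp [foldA_eq string [] []]
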